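-- pv_equiv track=rewrite | github.com/SK-Rookies-Module-2/Vuln-Inspector | plugins/remote/kisa_u03/main.py | _parse_aix_loginretries
-- ===== SOURCE A (Python) =====
-- from typing import Dict, List, Optional, Tuple
--
-- def _parse_aix_loginretries(
--     lines: List[str]
-- ) -> Tuple[Optional[str], Optional[str], Optional[str]]:
--     stanzas: Dict[str, Dict[str, str]] = {}
--     line_map: Dict[Tuple[str, str], str] = {}
--     current: Optional[str] = None
--     for raw_line in lines:
--         stripped = raw_line.strip()
--         if not stripped or stripped.startswith("#"):
--             continue
--         if raw_line.lstrip() == raw_line and stripped.endswith(":"):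
--             current = stripped[:-1].strip().lower()
--             stanzas.setdefault(current, {})
--             continue
--         if current is None:
--             continue
--         if "=" in stripped:
--             key, value = [part.strip() for part in stripped.split("=", 1)]
--             stanzas[current][key.lower()] = value
--             line_map[(current, key.lower())] = raw_line.strip()
--
--     for section in ("root", "default"):
--         value = stanzas.get(section, {}).get("loginretries")
--         if value is not None:
--             return value, section, line_map.get((section, "loginretries"))
--     return None, None, None
-- ===== SOURCE B (Python) =====
-- from typing import List, Optional, Tuple
--
-- def _parse_aix_loginretries(
--     lines: List[str]
-- ) -> Tuple[Optional[str], Optional[str], Optional[str]]: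
--     current: Optional[str] = None
--     root_slot: Optional[Tuple[str, str]] = None
--     default_slot: Optional[Tuple[str, str]] = None
--     for raw_line in lines:
--         stripped = raw_line.strip()
--         if not stripped or stripped.startswith("#"):
--             continue
--         if raw_line.lstrip() == raw_line and stripped.endswith(":"):
--             current = stripped[:-1].strip().lower()
--             continue
--         if current is None or "=" not in stripped:
--             continue
--         key, value = stripped.split("=", 1)
--         if key.strip().lower() != "loginretries":
--             continue
--         if current == "root":
--             root_slot = (value.strip(), stripped)
--         elif current == "default":
--             default_slot = (value.strip(), stripped)
--     for section, slot in (("root", root_slot), ("default", default_slot)):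
--         if slot is not None:
--             return slot[0], section, slot[1]
--     return None, None, None
-- ===== Notes on version B (the rewrite author's own statement) =====
-- stated objective: simpler
-- what changed: Instead of accumulating full stanzas and line_map dictionaries and scanning them afterwards, B keeps only two result slots (root/default) for the single key 'loginretries', overwriting on repeats, and picks root over default at the end.
import Mathlib
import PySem

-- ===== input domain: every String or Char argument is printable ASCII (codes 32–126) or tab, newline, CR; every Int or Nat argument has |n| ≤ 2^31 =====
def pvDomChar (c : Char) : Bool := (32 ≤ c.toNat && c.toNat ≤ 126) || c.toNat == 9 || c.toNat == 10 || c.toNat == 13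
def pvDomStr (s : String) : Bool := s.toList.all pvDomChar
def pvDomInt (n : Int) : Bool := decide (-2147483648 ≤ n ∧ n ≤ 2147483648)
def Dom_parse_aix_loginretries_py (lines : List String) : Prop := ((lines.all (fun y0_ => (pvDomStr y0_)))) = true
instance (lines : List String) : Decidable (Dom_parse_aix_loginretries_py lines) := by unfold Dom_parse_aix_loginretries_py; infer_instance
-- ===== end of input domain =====

-- B replaces A's two accumulated dictionaries with just two result slots for 'loginretries'
-- under 'root'/'default' (simpler decomposition, same per-line cost).

-- ===== PORT A =====
def pvA_loop : List String → PySem.Dict String (PySem.Dict String String) →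
    PySem.Dict (String × String) String → Option String →
    PySem.Dict String (PySem.Dict String String) × PySem.Dict (String × String) String
  | [], stanzas, lmap, _ => (stanzas, lmap)
  | raw :: rest, stanzas, lmap, current =>
    let stripped := PySem.Str.strip raw
    if stripped = "" ∨ PySem.Str.startswith stripped "#" then
      pvA_loop rest stanzas lmap current
    else if PySem.Str.lstrip raw = raw ∧ PySem.Str.endswith stripped ":" then
      let cur := PySem.Str.lower (PySem.Str.strip (PySem.Str.slice stripped none (some (-1))))
      pvA_loop rest (stanzas.setdefault cur PySem.Dict.empty) lmap (some cur)
    else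
      match current with
      | none => pvA_loop rest stanzas lmap none
      | some cur =>
        if PySem.Str.isIn "=" stripped then
          match PySem.Str.splitMax? stripped "=" 1 with
          | some (k :: v :: _) =>
            let kl := PySem.Str.lower (PySem.Str.strip k)
            pvA_loop rest
              (stanzas.modify cur PySem.Dict.empty (fun d => d.insert kl (PySem.Str.strip v)))
              (lmap.insert (cur, kl) stripped) (some cur)
          | _ => pvA_loop rest stanzas lmap (some cur)  -- unreachable: '=' ∈ stripped gives ≥ 2 parts
        else pvA_loop rest stanzas lmap (some cur)

def parse_aix_loginretries_py (lines : List String) : Option String × Option String × Option String :=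
  let st := pvA_loop lines PySem.Dict.empty PySem.Dict.empty none
  match (st.1.getD "root" PySem.Dict.empty).get? "loginretries" with
  | some v => (some v, some "root", st.2.get? ("root", "loginretries"))
  | none =>
    match (st.1.getD "default" PySem.Dict.empty).get? "loginretries" with
    | some v => (some v, some "default", st.2.get? ("default", "loginretries"))
    | none => (none, none, none)

-- ===== PORT B =====
def pvB_loop : List String → Option String → Option (String × String) → Option (String × String) →
    Option (String × String) × Option (String × String)
  | [], _, root, dflt => (root, dflt)
  | raw :: rest, current, root, dflt =>
    let stripped := PySem.Str.strip raw
    if stripped = "" ∨ PySem.Str.startswith stripped "#" then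
      pvB_loop rest current root dflt
    else if PySem.Str.lstrip raw = raw ∧ PySem.Str.endswith stripped ":" then
      pvB_loop rest
        (some (PySem.Str.lower (PySem.Str.strip (PySem.Str.slice stripped none (some (-1))))))
        root dflt
    else
      match current with
      | none => pvB_loop rest none root dflt
      | some cur =>
        if PySem.Str.isIn "=" stripped then
          match PySem.Str.splitMax? stripped "=" 1 with
          | some (k :: v :: _) =>
            if PySem.Str.lower (PySem.Str.strip k) = "loginretries" then
              if cur = "root" then
                pvB_loop rest (some cur) (some (PySem.Str.strip v, stripped)) dflt
              else if cur = "default" then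
                pvB_loop rest (some cur) root (some (PySem.Str.strip v, stripped))
              else pvB_loop rest (some cur) root dflt
            else pvB_loop rest (some cur) root dflt
          | _ => pvB_loop rest (some cur) root dflt  -- unreachable: '=' ∈ stripped gives ≥ 2 parts
        else pvB_loop rest (some cur) root dflt

def parse_aix_loginretries_py_alt (lines : List String) : Option String × Option String × Option String :=
  let st := pvB_loop lines none none none
  match st.1 with
  | some (v, l) => (some v, some "root", some l)
  | none =>
    match st.2 with
    | some (v, l) => (some v, some "default", some l)
    | none => (none, none, none)

-- ===== PRECONDITION & SPEC =====
def Spec_parse_aix_loginretries_py (lines : List String) (out : Option String × Option String × Option String) : Prop := out = parse_aix_loginretries_py_alt lines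
instance (lines : List String) (out : Option String × Option String × Option String) : Decidable (Spec_parse_aix_loginretries_py lines out) := by unfold Spec_parse_aix_loginretries_py; infer_instance

-- ===== CLAIM (what is proved, stated in full; the proofs are below) =====
def Claim_equal_parse_aix_loginretries_py : Prop := ∀ (lines : List String), Dom_parse_aix_loginretries_py lines → Spec_parse_aix_loginretries_py lines (parse_aix_loginretries_py lines)

-- ===== LEMMAS AND PROOFS =====

lemma pv_pair_ne_left {a b c d : String} (h : a ≠ c) : (a, b) ≠ (c, d) := by simp [h]

lemma pv_pair_ne_right {a b c d : String} (h : b ≠ d) : (a, b) ≠ (c, d) := by simp [h]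

lemma pv_getD_setdefault_empty (d : PySem.Dict String (PySem.Dict String String)) (k sec : String) :
    (d.setdefault k PySem.Dict.empty).getD sec PySem.Dict.empty = d.getD sec PySem.Dict.empty := by
  by_cases h : sec = k
  · subst h; exact PySem.Dict.getD_setdefault_self ..
  · rw [PySem.Dict.getD_eq_get?_getD, PySem.Dict.get?_setdefault_of_ne _ _ h,
      ← PySem.Dict.getD_eq_get?_getD]

theorem pv_loop_agree : ∀ (lines : List String)
    (stanzas : PySem.Dict String (PySem.Dict String String))
    (lmap : PySem.Dict (String × String) String) (current : Option String)
    (root dflt : Option (String × String)),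
    (stanzas.getD "root" PySem.Dict.empty).get? "loginretries" = root.map (·.1) →
    lmap.get? ("root", "loginretries") = root.map (·.2) →
    (stanzas.getD "default" PySem.Dict.empty).get? "loginretries" = dflt.map (·.1) →
    lmap.get? ("default", "loginretries") = dflt.map (·.2) →
    (((pvA_loop lines stanzas lmap current).1.getD "root" PySem.Dict.empty).get? "loginretries"
        = (pvB_loop lines current root dflt).1.map (·.1)) ∧
    ((pvA_loop lines stanzas lmap current).2.get? ("root", "loginretries")
        = (pvB_loop lines current root dflt).1.map (·.2)) ∧
    (((pvA_loop lines stanzas lmap current).1.getD "default" PySem.Dict.empty).get? "loginretries"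
        = (pvB_loop lines current root dflt).2.map (·.1)) ∧
    ((pvA_loop lines stanzas lmap current).2.get? ("default", "loginretries")
        = (pvB_loop lines current root dflt).2.map (·.2)) := by
  intro lines
  induction lines with
  | nil =>
    intro stanzas lmap current root dflt h1 h2 h3 h4
    simp [pvA_loop, pvB_loop, h1, h2, h3, h4]
  | cons raw rest ih =>
    intro stanzas lmap current root dflt h1 h2 h3 h4
    simp only [pvA_loop, pvB_loop]
    by_cases hc1 : PySem.Str.strip raw = "" ∨ PySem.Str.startswith (PySem.Str.strip raw) "#" = true
    · simp only [if_pos hc1]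
      exact ih stanzas lmap current root dflt h1 h2 h3 h4
    · simp only [if_neg hc1]
      by_cases hc2 : PySem.Str.lstrip raw = raw ∧ PySem.Str.endswith (PySem.Str.strip raw) ":" = true
      · simp only [if_pos hc2]
        exact ih _ _ _ _ _
          (by rw [pv_getD_setdefault_empty]; exact h1) h2
          (by rw [pv_getD_setdefault_empty]; exact h3) h4
      · simp only [if_neg hc2]
        cases current with
        | none => exact ih stanzas lmap none root dflt h1 h2 h3 h4
        | some cur =>
          by_cases hc3 : PySem.Str.isIn "=" (PySem.Str.strip raw) = true
          · simp only [if_pos hc3]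
            cases hsp : PySem.Str.splitMax? (PySem.Str.strip raw) "=" 1 with
            | none => exact ih stanzas lmap (some cur) root dflt h1 h2 h3 h4
            | some parts =>
              match parts with
              | [] => exact ih stanzas lmap (some cur) root dflt h1 h2 h3 h4
              | [k] => exact ih stanzas lmap (some cur) root dflt h1 h2 h3 h4
              | k :: v :: t =>
                by_cases hk : PySem.Str.lower (PySem.Str.strip k) = "loginretries"
                · by_cases hr : cur = "root"
                  · subst hr
                    simp only [hk]
                    refine ih _ _ _ _ _ ?_ ?_ ?_ ?_
                    · rw [PySem.Dict.getD_modify, if_pos rfl, PySem.Dict.get?_insert]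
                      simp
                    · rw [PySem.Dict.get?_insert]
                      simp
                    · rw [PySem.Dict.getD_modify, if_neg (by decide : ¬ ("default" : String) = "root")]
                      exact h3
                    · rw [PySem.Dict.get?_insert,
                        if_neg (pv_pair_ne_left (by decide : ("default" : String) ≠ "root"))]
                      exact h4
                  · by_cases hd : cur = "default"
                    · subst hd
                      simp only [hk, if_neg hr]
                      refine ih _ _ _ _ _ ?_ ?_ ?_ ?_
                      · rw [PySem.Dict.getD_modify, if_neg (by decide : ¬ ("root" : String) = "default")]
                        exact h1
                      · rw [PySem.Dict.get?_insert,
                          if_neg (pv_pair_ne_left (by decide : ("root" : String) ≠ "default"))]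
                        exact h2
                      · rw [PySem.Dict.getD_modify, if_pos rfl, PySem.Dict.get?_insert]
                        simp
                      · rw [PySem.Dict.get?_insert]
                        simp
                    · simp only [hk, if_neg hr, if_neg hd]
                      refine ih _ _ _ _ _ ?_ ?_ ?_ ?_
                      · rw [PySem.Dict.getD_modify, if_neg (Ne.symm hr)]
                        exact h1
                      · rw [PySem.Dict.get?_insert, if_neg (pv_pair_ne_left (Ne.symm hr))]
                        exact h2
                      · rw [PySem.Dict.getD_modify, if_neg (Ne.symm hd)]
                        exact h3
                      · rw [PySem.Dict.get?_insert, if_neg (pv_pair_ne_left (Ne.symm hd))]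
                        exact h4
                · simp only [if_neg hk]
                  refine ih _ _ _ _ _ ?_ ?_ ?_ ?_
                  · rw [PySem.Dict.getD_modify]
                    split_ifs with hrc
                    · rw [PySem.Dict.get?_insert, if_neg (Ne.symm hk), ← hrc]
                      exact h1
                    · exact h1
                  · rw [PySem.Dict.get?_insert, if_neg (pv_pair_ne_right (Ne.symm hk))]
                    exact h2
                  · rw [PySem.Dict.getD_modify]
                    split_ifs with hdc
                    · rw [PySem.Dict.get?_insert, if_neg (Ne.symm hk), ← hdc]
                      exact h3
                    · exact h3
                  · rw [PySem.Dict.get?_insert, if_neg (pv_pair_ne_right (Ne.symm hk))]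
                    exact h4
          · simp only [if_neg hc3]
            exact ih stanzas lmap (some cur) root dflt h1 h2 h3 h4

-- ===== VERDICT (by name: the statement is the Claim_ definition above) =====
theorem parse_aix_loginretries_py_spec : Claim_equal_parse_aix_loginretries_py := by
  intro lines _
  unfold Spec_parse_aix_loginretries_py parse_aix_loginretries_py parse_aix_loginretries_py_alt
  obtain ⟨h1, h2, h3, h4⟩ := pv_loop_agree lines PySem.Dict.empty PySem.Dict.empty none none none
    (by simp) (by simp) (by simp) (by simp)
  cases hr : (pvB_loop lines none none none).1 with
  | some p =>
    obtain ⟨v, l⟩ := p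
    rw [hr] at h1 h2
    simp only [hr, h1, h2, Option.map_some]
  | none =>
    rw [hr] at h1 h2
    cases hd : (pvB_loop lines none none none).2 with
    | some p =>
      obtain ⟨v, l⟩ := p
      rw [hd] at h3 h4
      simp only [hr, hd, h1, h3, h4, Option.map_some, Option.map_none]
    | none =>
      rw [hd] at h3 h4
      simp only [hr, hd, h1, h3, Option.map_none]
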